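-- pv_equiv track=rewrite | github.com/United-Tribes/unitedtribes-visualizations | Documents/unitedtribes/unitedtribes-content-pipeline/src/articles/pitchfork_scraper.py | _prioritize_urls
-- ===== SOURCE A (Python) =====
-- from typing import List, Dict, Any, Optional
--
-- def _prioritize_urls(urls: List[str]) -> List[str]:
--     """Prioritize URLs by content type importance"""
--     reviews = []
--     features = []
--     news = []
--     other = []
--
--     for url in urls:
--         if '/reviews/' in url:
--             reviews.append(url)
--         elif '/features/' in url:
--             features.append(url)
--         elif '/news/' in url:
--             news.append(url)
--         else:
--             other.append(url)
--
--     # Return in priority order: reviews, features, news, other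
--     return reviews + features + news + other
-- ===== SOURCE B (Python) =====
-- def _prioritize_urls(urls):
--     """Prioritize URLs by content type importance"""
--     def priority(url):
--         if '/reviews/' in url:
--             return 0
--         elif '/features/' in url:
--             return 1
--         elif '/news/' in url:
--             return 2
--         else:
--             return 3
--     return sorted(urls, key=priority)
-- ===== Notes on version B (the rewrite author's own statement) =====
-- stated objective: idiomatic
-- what changed: Replaces the four explicit buckets and concatenation with a per-URL priority key and a single stable sort (sorted(urls, key=priority)), whose stability reproduces the bucket order exactly.
import Mathlib
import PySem

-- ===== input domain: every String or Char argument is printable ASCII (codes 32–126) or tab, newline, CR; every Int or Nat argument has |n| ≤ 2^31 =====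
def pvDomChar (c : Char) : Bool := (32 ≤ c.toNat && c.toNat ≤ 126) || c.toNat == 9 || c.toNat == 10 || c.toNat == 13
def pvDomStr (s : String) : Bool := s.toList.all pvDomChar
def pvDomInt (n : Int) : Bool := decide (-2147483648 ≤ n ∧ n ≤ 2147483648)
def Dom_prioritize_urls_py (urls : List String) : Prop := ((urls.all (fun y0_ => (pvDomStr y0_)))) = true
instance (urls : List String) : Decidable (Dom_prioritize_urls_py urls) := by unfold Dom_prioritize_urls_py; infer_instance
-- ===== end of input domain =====

-- B replaces A's four explicit buckets with a priority key and one stable sort (idiomatic; same results).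


-- ===== PORT A =====
-- one pass appending each url to one of four buckets, then concatenation
def prioritize_urls_py (urls : List String) : List String :=
  let st := urls.foldl (fun st url =>
    if PySem.Str.isIn "/reviews/" url then (st.1 ++ [url], st.2.1, st.2.2.1, st.2.2.2)
    else if PySem.Str.isIn "/features/" url then (st.1, st.2.1 ++ [url], st.2.2.1, st.2.2.2)
    else if PySem.Str.isIn "/news/" url then (st.1, st.2.1, st.2.2.1 ++ [url], st.2.2.2)
    else (st.1, st.2.1, st.2.2.1, st.2.2.2 ++ [url]))
    (([], [], [], []) : List String × List String × List String × List String)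
  st.1 ++ st.2.1 ++ st.2.2.1 ++ st.2.2.2

-- ===== PORT B =====
-- B's helper `priority(url)`
def pvPriority (url : String) : Int :=
  if PySem.Str.isIn "/reviews/" url then 0
  else if PySem.Str.isIn "/features/" url then 1
  else if PySem.Str.isIn "/news/" url then 2
  else 3

-- sorted(urls, key=priority): stable sort by the priority key
def prioritize_urls_py_alt (urls : List String) : List String :=
  PySem.List.sorted urls pvPriority false

-- ===== PRECONDITION & SPEC =====
def Spec_prioritize_urls_py (urls : List String) (out : List String) : Prop := out = prioritize_urls_py_alt urls
instance (urls : List String) (out : List String) : Decidable (Spec_prioritize_urls_py urls out) := by unfold Spec_prioritize_urls_py; infer_instance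

-- ===== CLAIM (what is proved, stated in full; the proofs are below) =====
def Claim_equal_prioritize_urls_py : Prop := ∀ (urls : List String), Dom_prioritize_urls_py urls → Spec_prioritize_urls_py urls (prioritize_urls_py urls)

-- ===== LEMMAS AND PROOFS =====

-- priorities are one of 0,1,2,3
theorem pvPriority_cases (u : String) :
    pvPriority u = 0 ∨ pvPriority u = 1 ∨ pvPriority u = 2 ∨ pvPriority u = 3 := by
  unfold pvPriority; split_ifs <;> simp

-- insertBy skips a prefix it does not go before
theorem insertBy_append_skip {α : Type} (before : α → α → Bool) (x : α) (A B : List α)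
    (h : ∀ y ∈ A, before x y = false) :
    PySem.List.insertBy before x (A ++ B) = A ++ PySem.List.insertBy before x B := by
  induction A with
  | nil => simp
  | cons a A ih =>
    have ha : before x a = false := h a (by simp)
    simp [PySem.List.insertBy, ha, ih (fun y hy => h y (by simp [hy]))]

-- insertBy puts x in front of a list it goes before entirely
theorem insertBy_eq_cons {α : Type} (before : α → α → Bool) (x : α) (B : List α)
    (h : ∀ y ∈ B, before x y = true) :
    PySem.List.insertBy before x B = x :: B := by
  cases B with
  | nil => simp [PySem.List.insertBy]
  | cons b B => simp [PySem.List.insertBy, h b (by simp)]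

-- wrapper around PySem.List.insertBy_of_forall_not_before with the name used below
theorem insertBy_of_forall_not_before_local {α : Type} (before : α → α → Bool) (x : α) (ys : List α)
    (h : ∀ y ∈ ys, before x y = false) :
    PySem.List.insertBy before x ys = ys ++ [x] :=
  PySem.List.insertBy_of_forall_not_before before x ys h

-- the stable insertion-sort fold keeps the four priority groups in order
theorem sort_fold_groups (xs : List String) :
    ∀ (g0 g1 g2 g3 : List String),
      (∀ y ∈ g0, pvPriority y = 0) → (∀ y ∈ g1, pvPriority y = 1) →
      (∀ y ∈ g2, pvPriority y = 2) → (∀ y ∈ g3, pvPriority y = 3) →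
      xs.foldl (fun acc x => PySem.List.insertBy (fun a b => decide (pvPriority a < pvPriority b)) x acc)
          (g0 ++ g1 ++ g2 ++ g3)
        = (g0 ++ xs.filter (fun u => pvPriority u == 0)) ++ (g1 ++ xs.filter (fun u => pvPriority u == 1))
          ++ (g2 ++ xs.filter (fun u => pvPriority u == 2)) ++ (g3 ++ xs.filter (fun u => pvPriority u == 3)) := by
  induction xs with
  | nil => intro g0 g1 g2 g3 _ _ _ _; simp
  | cons x xs ih =>
    intro g0 g1 g2 g3 h0 h1 h2 h3
    rw [List.foldl_cons]
    rcases pvPriority_cases x with hx | hx | hx | hx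
    · have step : PySem.List.insertBy (fun a b => decide (pvPriority a < pvPriority b)) x
          (g0 ++ g1 ++ g2 ++ g3) = (g0 ++ [x]) ++ g1 ++ g2 ++ g3 := by
        rw [show g0 ++ g1 ++ g2 ++ g3 = g0 ++ (g1 ++ g2 ++ g3) from by simp]
        rw [insertBy_append_skip _ x g0 _ (by intro y hy; simp [h0 y hy, hx])]
        rw [insertBy_eq_cons _ x _ ?hcons0]
        case hcons0 =>
          intro y hy
          simp only [List.mem_append] at hy
          have hge : 1 ≤ pvPriority y := by
            rcases hy with (hy | hy) | hy
            · rw [h1 y hy]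
            · rw [h2 y hy]; norm_num
            · rw [h3 y hy]; norm_num
          simp only [decide_eq_true_eq, hx]; omega
        simp
      have hg0 : ∀ y ∈ g0 ++ [x], pvPriority y = 0 := by
        intro y hy
        rcases List.mem_append.1 hy with hy | hy
        · exact h0 y hy
        · simp only [List.mem_singleton] at hy; rw [hy, hx]
      rw [step, ih (g0 ++ [x]) g1 g2 g3 hg0 h1 h2 h3]
      simp [hx]
    · have step : PySem.List.insertBy (fun a b => decide (pvPriority a < pvPriority b)) x
          (g0 ++ g1 ++ g2 ++ g3) = g0 ++ (g1 ++ [x]) ++ g2 ++ g3 := by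
        rw [show g0 ++ g1 ++ g2 ++ g3 = (g0 ++ g1) ++ (g2 ++ g3) from by simp]
        rw [insertBy_append_skip _ x (g0 ++ g1) _ ?hskip1, insertBy_eq_cons _ x _ ?hcons1]
        case hskip1 =>
          intro y hy
          rcases List.mem_append.1 hy with hy | hy
          · simp [h0 y hy, hx]
          · simp [h1 y hy, hx]
        case hcons1 =>
          intro y hy
          have hge : 2 ≤ pvPriority y := by
            rcases List.mem_append.1 hy with hy | hy
            · rw [h2 y hy]
            · rw [h3 y hy]; norm_num
          simp only [decide_eq_true_eq, hx]; omega
        simp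
      have hg1 : ∀ y ∈ g1 ++ [x], pvPriority y = 1 := by
        intro y hy
        rcases List.mem_append.1 hy with hy | hy
        · exact h1 y hy
        · simp only [List.mem_singleton] at hy; rw [hy, hx]
      rw [step, ih g0 (g1 ++ [x]) g2 g3 h0 hg1 h2 h3]
      simp [hx]
    · have step : PySem.List.insertBy (fun a b => decide (pvPriority a < pvPriority b)) x
          (g0 ++ g1 ++ g2 ++ g3) = g0 ++ g1 ++ (g2 ++ [x]) ++ g3 := by
        rw [show g0 ++ g1 ++ g2 ++ g3 = (g0 ++ g1 ++ g2) ++ g3 from rfl]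
        rw [insertBy_append_skip _ x (g0 ++ g1 ++ g2) _ ?hskip2, insertBy_eq_cons _ x _ ?hcons2]
        case hskip2 =>
          intro y hy
          simp only [List.mem_append] at hy
          rcases hy with (hy | hy) | hy
          · simp [h0 y hy, hx]
          · simp [h1 y hy, hx]
          · simp [h2 y hy, hx]
        case hcons2 =>
          intro y hy
          simp only [decide_eq_true_eq, hx, h3 y hy]; norm_num
        simp
      have hg2 : ∀ y ∈ g2 ++ [x], pvPriority y = 2 := by
        intro y hy
        rcases List.mem_append.1 hy with hy | hy
        · exact h2 y hy
        · simp only [List.mem_singleton] at hy; rw [hy, hx]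
      rw [step, ih g0 g1 (g2 ++ [x]) g3 h0 h1 hg2 h3]
      simp [hx]
    · have step : PySem.List.insertBy (fun a b => decide (pvPriority a < pvPriority b)) x
          (g0 ++ g1 ++ g2 ++ g3) = g0 ++ g1 ++ g2 ++ (g3 ++ [x]) := by
        rw [insertBy_of_forall_not_before_local _ x _ ?hskip3]
        case hskip3 =>
          intro y hy
          simp only [List.mem_append] at hy
          have hle : pvPriority y ≤ 3 := by
            rcases hy with ((hy | hy) | hy) | hy
            · rw [h0 y hy]; norm_num
            · rw [h1 y hy]; norm_num
            · rw [h2 y hy]; norm_num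
            · rw [h3 y hy]
          simp only [decide_eq_false_iff_not, hx, not_lt]; omega
        simp
      have hg3 : ∀ y ∈ g3 ++ [x], pvPriority y = 3 := by
        intro y hy
        rcases List.mem_append.1 hy with hy | hy
        · exact h3 y hy
        · simp only [List.mem_singleton] at hy; rw [hy, hx]
      rw [step, ih g0 g1 g2 (g3 ++ [x]) h0 h1 h2 hg3]
      simp [hx]

-- A's bucket fold, characterized by the same filters
theorem bucket_fold (xs : List String) :
    ∀ (r f n o : List String),
      xs.foldl (fun st url =>
        if PySem.Str.isIn "/reviews/" url then (st.1 ++ [url], st.2.1, st.2.2.1, st.2.2.2)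
        else if PySem.Str.isIn "/features/" url then (st.1, st.2.1 ++ [url], st.2.2.1, st.2.2.2)
        else if PySem.Str.isIn "/news/" url then (st.1, st.2.1, st.2.2.1 ++ [url], st.2.2.2)
        else (st.1, st.2.1, st.2.2.1, st.2.2.2 ++ [url])) (r, f, n, o)
      = (r ++ xs.filter (fun u => pvPriority u == 0), f ++ xs.filter (fun u => pvPriority u == 1),
         n ++ xs.filter (fun u => pvPriority u == 2), o ++ xs.filter (fun u => pvPriority u == 3)) := by
  induction xs with
  | nil => intro r f n o; simp
  | cons x xs ih =>
    intro r f n o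
    rw [List.foldl_cons]
    by_cases h1 : PySem.Str.isIn "/reviews/" x = true
    · have hp : pvPriority x = 0 := by unfold pvPriority; rw [if_pos h1]
      simp only [h1, if_true, ih]
      simp [hp]
    · by_cases h2 : PySem.Str.isIn "/features/" x = true
      · have hp : pvPriority x = 1 := by unfold pvPriority; rw [if_neg h1, if_pos h2]
        simp only [h1, h2, if_true, if_false, Bool.false_eq_true, ih]
        simp [hp]
      · by_cases h3 : PySem.Str.isIn "/news/" x = true
        · have hp : pvPriority x = 2 := by unfold pvPriority; rw [if_neg h1, if_neg h2, if_pos h3]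
          simp only [h1, h2, h3, if_true, if_false, Bool.false_eq_true, ih]
          simp [hp]
        · have hp : pvPriority x = 3 := by unfold pvPriority; rw [if_neg h1, if_neg h2, if_neg h3]
          simp only [h1, h2, h3, if_false, Bool.false_eq_true, ih]
          simp [hp]

-- ===== VERDICT (by name: the statement is the Claim_ definition above) =====
theorem prioritize_urls_py_spec : Claim_equal_prioritize_urls_py := by
  intro urls _
  unfold Spec_prioritize_urls_py prioritize_urls_py prioritize_urls_py_alt
  rw [PySem.List.sorted_eq_foldl_insertBy]
  have hb := sort_fold_groups urls [] [] [] [] (by simp) (by simp) (by simp) (by simp)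
  simp only [List.nil_append] at hb
  rw [hb, bucket_fold urls [] [] [] []]
  simp
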